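-- pv_equiv track=rewrite | github.com/Josipmrden/SymbolicRegressionResearch | lnf_util.py | get_max_distance
-- ===== SOURCE A (Python) =====
-- def get_max_distance(distances):
--     max_distance = -1
--     index = -1
--
--     for i in range(len(distances)):
--         distance = distances[i]
--         if index == -1:
--             index = i
--             max_distance = distance
--             continue
--         if distance > max_distance:
--             index = i
--             max_distance = distance
--
--     return max_distance, index
-- ===== SOURCE B (Python) =====
-- def get_max_distance(distances):
--     if not distances:
--         return -1, -1
--     m = max(distances)
--     return m, distances.index(m)
-- ===== Notes on version B (the rewrite author's own statement) =====
-- stated objective: simpler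
-- what changed: Replaces the single stateful index-tracking scan with an explicit empty-case guard followed by max() and a first-occurrence .index() lookup.
import Mathlib
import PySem

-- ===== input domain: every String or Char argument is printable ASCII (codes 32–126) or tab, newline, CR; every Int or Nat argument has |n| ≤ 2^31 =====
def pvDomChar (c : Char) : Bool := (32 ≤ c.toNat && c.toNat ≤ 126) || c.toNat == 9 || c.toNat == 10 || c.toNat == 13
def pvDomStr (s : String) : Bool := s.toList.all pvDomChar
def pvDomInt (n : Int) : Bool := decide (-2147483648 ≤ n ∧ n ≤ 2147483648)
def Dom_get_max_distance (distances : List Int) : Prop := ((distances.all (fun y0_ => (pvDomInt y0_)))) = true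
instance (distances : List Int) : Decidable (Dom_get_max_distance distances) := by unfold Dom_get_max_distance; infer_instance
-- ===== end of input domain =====

-- B replaces A's single stateful index-tracking scan with an empty-case guard, max(), and a
-- first-occurrence index lookup; objective: simpler.

-- ===== PORT A =====
-- the for-loop over range(len(distances)) with state (max_distance, index, i)
def getMaxLoop (maxd idx i : Int) : List Int → Int × Int
  | [] => (maxd, idx)
  | d :: rest =>
    if idx = -1 then getMaxLoop d i (i + 1) rest
    else if d > maxd then getMaxLoop d i (i + 1) rest
    else getMaxLoop maxd idx (i + 1) rest

def get_max_distance (distances : List Int) : Int × Int :=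
  getMaxLoop (-1) (-1) 0 distances

-- ===== PORT B =====
-- Source B: empty guard (= the none case of max?), then m = max(distances); return m, distances.index(m)
def get_max_distance_alt (distances : List Int) : Int × Int :=
  match PySem.List.max? distances (fun y => y) with
  | none => (-1, -1)
  | some m => (m, ((PySem.List.index? distances m).getD 0 : Nat))

-- ===== PRECONDITION & SPEC =====
def Spec_get_max_distance (distances : List Int) (out : Int × Int) : Prop := out = get_max_distance_alt distances
instance (distances : List Int) (out : Int × Int) : Decidable (Spec_get_max_distance distances out) := by unfold Spec_get_max_distance; infer_instance

-- ===== CLAIM (what is proved, stated in full; the proofs are below) =====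
def Claim_equal_get_max_distance : Prop := ∀ (distances : List Int), Dom_get_max_distance distances → Spec_get_max_distance distances (get_max_distance distances)

-- ===== LEMMAS AND PROOFS =====

theorem foldl_max_ge (t : List Int) : ∀ a : Int, a ≤ t.foldl max a := by
  induction t with
  | nil => intro a; simp [List.foldl]
  | cons d rest ih =>
    intro a
    simpa [List.foldl] using le_trans (le_max_left a d) (ih (max a d))

theorem foldl_max_mem (t : List Int) : ∀ a : Int, t.foldl max a = a ∨ t.foldl max a ∈ t := by
  induction t with
  | nil => intro a; simp [List.foldl]
  | cons d rest ih =>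
    intro a
    rcases ih (max a d) with h | h
    · rcases max_cases a d with ⟨he, _⟩ | ⟨he, _⟩
      · rw [he] at h
        left; simp only [List.foldl]; rw [he]; exact h
      · rw [he] at h
        right; simp only [List.foldl]; rw [he, h]; exact List.mem_cons_self
    · right; simp only [List.foldl]; exact List.mem_cons_of_mem _ h

theorem getMaxLoop_spec (t : List Int) : ∀ maxd idx i : Int, idx ≠ -1 → 0 ≤ i →
    getMaxLoop maxd idx i t =
      (t.foldl max maxd,
       if t.foldl max maxd = maxd then idx else i + (t.idxOf (t.foldl max maxd) : Int)) := by
  induction t with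
  | nil => intro maxd idx i h hi; simp [getMaxLoop, List.foldl]
  | cons d rest ih =>
    intro maxd idx i h hi
    have hm' : (d :: rest).foldl max maxd = rest.foldl max (max maxd d) := by
      simp [List.foldl]
    by_cases hgt : d > maxd
    · have hstep : getMaxLoop maxd idx i (d :: rest) = getMaxLoop d i (i + 1) rest := by
        by_cases hidx : idx = -1 <;> simp [getMaxLoop, hidx, hgt]
      rw [hstep, ih d i (i + 1) (by omega) (by omega)]
      have hmax : max maxd d = d := max_eq_right (le_of_lt hgt)
      have hge : d ≤ rest.foldl max d := foldl_max_ge rest d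
      have hne : rest.foldl max d ≠ maxd := by omega
      rw [hm', hmax]
      refine Prod.ext rfl ?_
      simp only [hne, if_false]
      by_cases hd : rest.foldl max d = d
      · simp [hd, List.idxOf_cons_self]
      · have : (d :: rest).idxOf (rest.foldl max d) = rest.idxOf (rest.foldl max d) + 1 := by
          simp [List.idxOf_cons, beq_iff_eq, Ne.symm hd]
        simp [hd, this]
        push_cast
        ring
    · -- d ≤ maxd, so idx ≠ -1 and the running max is unchanged
      have hstep : getMaxLoop maxd idx i (d :: rest) = getMaxLoop maxd idx (i + 1) rest := by
        simp [getMaxLoop, h, hgt]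
      rw [hstep, ih maxd idx (i + 1) h (by omega)]
      have hmax : max maxd d = maxd := max_eq_left (by omega)
      rw [hm', hmax]
      refine Prod.ext rfl ?_
      by_cases heq : rest.foldl max maxd = maxd
      · simp [heq]
      · have hge : maxd ≤ rest.foldl max maxd := foldl_max_ge rest maxd
        have hned : rest.foldl max maxd ≠ d := by omega
        have : (d :: rest).idxOf (rest.foldl max maxd) = rest.idxOf (rest.foldl max maxd) + 1 := by
          simp [List.idxOf_cons, beq_iff_eq, Ne.symm hned]
        simp [heq, this]
        push_cast
        ring

-- ===== VERDICT (by name: the statement is the Claim_ definition above) =====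
theorem get_max_distance_spec : Claim_equal_get_max_distance := by
  unfold Claim_equal_get_max_distance
  intro distances _
  unfold Spec_get_max_distance
  cases distances with
  | nil => rfl
  | cons x t =>
    have hA : get_max_distance (x :: t) = getMaxLoop x 0 1 t := by
      simp [get_max_distance, getMaxLoop]
    rw [hA, getMaxLoop_spec t x 0 1 (by norm_num) (by norm_num)]
    set m := t.foldl max x with hm
    have hB : get_max_distance_alt (x :: t) = (m, (((PySem.List.index? (x :: t) m).getD 0 : Nat) : Int)) := by
      unfold get_max_distance_alt
      rw [PySem.List.max?_id_cons x t]
    rw [hB]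
    refine Prod.ext rfl ?_
    by_cases heq : m = x
    · have h0 : PySem.List.index? (x :: t) m = some 0 := by
        rw [heq]; exact PySem.List.index?_cons_self x t
      simp only
      rw [h0]
      simp [heq]
    · have hmem : m ∈ t := by
        rcases foldl_max_mem t x with h | h
        · exact absurd h heq
        · exact h
      have hidx : PySem.List.index? t m = some (t.idxOf m) := by
        rw [PySem.List.index?_eq_idxOf?]
        have hs : (t.idxOf? m).isSome := by simp [List.isSome_idxOf?, hmem]
        rcases Option.isSome_iff_exists.mp hs with ⟨k, hk⟩
        rw [hk, List.idxOf_eq_getD_idxOf?, hk]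
        rfl
      have hcons : PySem.List.index? (x :: t) m = (PySem.List.index? t m).map (· + 1) :=
        PySem.List.index?_cons_of_ne t (Ne.symm heq)
      simp only
      rw [hcons, hidx]
      simp [heq]
      push_cast
      ring
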